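-- pv_equiv track=rewrite | github.com/alexeycoder/gb-python-intro-homework-3 | task05.py | form_fibo_list_symmetrical
-- ===== SOURCE A (Python) =====
-- def form_fibo_list_symmetrical(number):
--     number = abs(number)
--
--     # shared part for n = 1 [fib-1, fib0, fib1]:
--     fibo_list = [1, 0, 1]
--
--     # fill positive (common fibonacci) items:
--     # fib0 <- fibo_list[1], fib1 <- fibo_list[2]
--     for i in range(3, number+2):
--         fibo_list.append(fibo_list[i-1] + fibo_list[i-2])
--
--     # fill negative (negofibonacci) items
--     for i in range(2, number+1):
--         fibo_list.insert(0, fibo_list[1] - fibo_list[0])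
--
--     return fibo_list
-- ===== SOURCE B (Python) =====
-- def form_fibo_list_symmetrical(number):
--     m = max(abs(number), 1)
--     # positive fibonacci values fib[0..m], computed once
--     fib = [0, 1]
--     for _ in range(m - 1):
--         fib.append(fib[-1] + fib[-2])
--     # negative half: mirror the positive values with alternating sign (negafibonacci symmetry)
--     negative = [fib[k] if k % 2 == 1 else -fib[k] for k in range(m, 0, -1)]
--     return negative + fib[:m + 1]
-- ===== Notes on version B (the rewrite author's own statement) =====
-- stated objective: faster
-- what changed: B computes the positive Fibonacci values once and derives the negative half by the alternating-sign negafibonacci symmetry, instead of A's separate difference recurrence with repeated insert at position zero of a growing list.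
import Mathlib
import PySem

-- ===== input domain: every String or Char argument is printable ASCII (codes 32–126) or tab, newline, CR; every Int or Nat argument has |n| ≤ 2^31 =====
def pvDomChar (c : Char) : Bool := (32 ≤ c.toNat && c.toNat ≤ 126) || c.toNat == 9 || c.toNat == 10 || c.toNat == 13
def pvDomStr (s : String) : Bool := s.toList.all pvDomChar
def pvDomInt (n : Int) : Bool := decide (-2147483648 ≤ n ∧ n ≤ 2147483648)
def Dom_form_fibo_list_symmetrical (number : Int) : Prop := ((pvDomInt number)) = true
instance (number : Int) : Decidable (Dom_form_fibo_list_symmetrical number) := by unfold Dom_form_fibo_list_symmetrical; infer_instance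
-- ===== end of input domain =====

-- B computes the positive Fibonacci values once and mirrors them with alternating sign
-- (negafibonacci symmetry) instead of A's separate difference recurrence with repeated
-- front insertion into a growing list (objective: faster; measured).

-- ===== PORT A =====
-- indices i-1, i-2 are always in range at the moment of access, so pyGetD's default is never used
def form_fibo_list_symmetrical (number : Int) : List Int :=
  let n := |number|
  let l1 := (PySem.List.pyRange 3 (n + 2) 1).foldl
      (fun l i => l ++ [PySem.List.pyGetD l (i - 1) 0 + PySem.List.pyGetD l (i - 2) 0])
      [1, 0, 1]
  (PySem.List.pyRange 2 (n + 1) 1).foldl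
      (fun l _i => PySem.List.insert l 0 (PySem.List.pyGetD l 1 0 - PySem.List.pyGetD l 0 0))
      l1

-- ===== PORT B =====
-- fib[-1], fib[-2] are always in range (the list never has fewer than 2 elements)
def form_fibo_list_symmetrical_alt (number : Int) : List Int :=
  let m := max |number| 1
  let fib := (PySem.List.pyRange 0 (m - 1) 1).foldl
      (fun f _k => f ++ [PySem.List.pyGetD f (-1) 0 + PySem.List.pyGetD f (-2) 0])
      [0, 1]
  let negative := (PySem.List.pyRange m 0 (-1)).map
      (fun k => if PySem.Int.mod k 2 = 1 then PySem.List.pyGetD fib k 0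
                else -(PySem.List.pyGetD fib k 0))
  negative ++ PySem.List.slice fib none (some (m + 1))

-- ===== PRECONDITION & SPEC =====
def Spec_form_fibo_list_symmetrical (number : Int) (out : List Int) : Prop := out = form_fibo_list_symmetrical_alt number
instance (number : Int) (out : List Int) : Decidable (Spec_form_fibo_list_symmetrical number out) := by unfold Spec_form_fibo_list_symmetrical; infer_instance

-- ===== CLAIM (what is proved, stated in full; the proofs are below) =====
def Claim_equal_form_fibo_list_symmetrical : Prop := ∀ (number : Int), Dom_form_fibo_list_symmetrical number → Spec_form_fibo_list_symmetrical number (form_fibo_list_symmetrical number)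

-- ===== LEMMAS AND PROOFS =====

-- fi k = fib(k); nf k = f(-k) = (-1)^(k+1)·fib(k)
def fi : Nat → Int
  | 0 => 0
  | 1 => 1
  | k + 2 => fi k + fi (k + 1)

def nf (k : Nat) : Int := if k % 2 = 0 then -(fi k) else fi k

-- negList j = [f(-(j+1)), …, f(-1), f(0)]
def negList : Nat → List Int
  | 0 => [1, 0]
  | j + 1 => nf (j + 2) :: negList j

theorem nf_zero : nf 0 = 0 := by simp [nf, fi]

theorem nf_one : nf 1 = 1 := by simp [nf, fi]

theorem negList_cons (j : Nat) : negList j = nf (j + 1) :: (negList j).tail := by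
  cases j with
  | zero => simp [negList, nf_one]
  | succ j' => simp [negList]

theorem fi_add_two (j : Nat) : fi (j + 2) = fi j + fi (j + 1) := by rw [fi]

theorem nf_sub (j : Nat) : nf j - nf (j + 1) = nf (j + 2) := by
  rcases Nat.even_or_odd j with h | h
  · have h0 : j % 2 = 0 := Nat.even_iff.mp h
    have ha : (j + 1) % 2 = 1 := by omega
    have hb : (j + 2) % 2 = 0 := by omega
    simp only [nf, h0, ha, hb, fi_add_two, if_true, if_false, reduceCtorEq]
    norm_num
    ring
  · have h1 : j % 2 = 1 := Nat.odd_iff.mp h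
    have ha : (j + 1) % 2 = 0 := by omega
    have hb : (j + 2) % 2 = 1 := by omega
    simp only [nf, h1, ha, hb, fi_add_two, if_true, if_false, reduceCtorEq]
    ring

theorem pyGetD_one_cons (a b : Int) (l : List Int) (d : Int) :
    PySem.List.pyGetD (a :: b :: l) 1 d = b := by
  have : ((1 : Nat) : Int) = (1 : Int) := by norm_cast
  rw [← this, PySem.List.pyGetD_natCast]
  rfl

-- first loop of A: positive fibonacci values
theorem posLoopA (t : Nat) :
    (PySem.List.pyRange 3 ((t : Int) + 1 + 2) 1).foldl
      (fun l i => l ++ [PySem.List.pyGetD l (i - 1) 0 + PySem.List.pyGetD l (i - 2) 0])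
      [1, 0, 1]
    = 1 :: (List.range (t + 2)).map fi := by
  induction t with
  | zero =>
    simp [PySem.List.pyRange_one_eq_nil, List.range_succ, fi]
  | succ t ih =>
    have hsplit : PySem.List.pyRange 3 ((↑(t + 1) : Int) + 1 + 2) 1
        = PySem.List.pyRange 3 ((t : Int) + 1 + 2) 1 ++ [(t : Int) + 3] := by
      have h3 : ((↑(t + 1) : Int) + 1 + 2) = ((t : Int) + 3) + 1 := by push_cast; ring
      rw [h3, PySem.List.pyRange_one_succ_right (by omega)]
      congr 1
    rw [hsplit, List.foldl_append, ih]
    simp only [List.foldl_cons, List.foldl_nil]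
    have hlen : (1 :: (List.range (t + 2)).map fi).length = t + 3 := by simp
    have h1 : PySem.List.pyGetD (1 :: (List.range (t + 2)).map fi) ((t : Int) + 3 - 1) 0
        = fi (t + 1) := by
      have hc : ((t : Int) + 3 - 1) = ((t + 2 : Nat) : Int) := by push_cast; ring
      rw [hc, PySem.List.pyGetD_natCast]
      rw [List.getD_eq_getElem _ _ (by simp)]
      simp
    have h2 : PySem.List.pyGetD (1 :: (List.range (t + 2)).map fi) ((t : Int) + 3 - 2) 0
        = fi t := by
      have hc : ((t : Int) + 3 - 2) = ((t + 1 : Nat) : Int) := by push_cast; ring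
      rw [hc, PySem.List.pyGetD_natCast]
      rw [List.getD_eq_getElem _ _ (by simp)]
      simp
    rw [h1, h2]
    have hfi : fi (t + 1) + fi t = fi (t + 2) := by rw [fi_add_two]; ring
    rw [hfi]
    simp [List.range_succ]

-- second loop of A: j insertions of negafibonacci values at the front
theorem negLoopA (m : Nat) (j : Nat) :
    (PySem.List.pyRange 2 ((j : Int) + 2) 1).foldl
      (fun l _i => PySem.List.insert l 0 (PySem.List.pyGetD l 1 0 - PySem.List.pyGetD l 0 0))
      (1 :: (List.range (m + 1)).map fi)
    = negList j ++ (List.range' 1 m).map fi := by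
  induction j with
  | zero =>
    rw [show ((0 : Nat) : Int) + 2 = 2 by norm_num, PySem.List.pyRange_one_eq_nil (by omega)]
    simp only [List.foldl_nil, negList]
    rw [List.range_eq_range', List.range'_succ]
    simp [fi]
  | succ j ih =>
    have hsplit : PySem.List.pyRange 2 ((↑(j + 1) : Int) + 2) 1
        = PySem.List.pyRange 2 ((j : Int) + 2) 1 ++ [(j : Int) + 2] := by
      have h3 : ((↑(j + 1) : Int) + 2) = ((j : Int) + 2) + 1 := by push_cast; ring
      rw [h3, PySem.List.pyRange_one_succ_right (by omega)]
    rw [hsplit, List.foldl_append, ih]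
    simp only [List.foldl_cons, List.foldl_nil]
    have hshape : negList j ++ (List.range' 1 m).map fi
        = nf (j + 1) :: nf j :: ((negList j).tail.tail ++ (List.range' 1 m).map fi) := by
      cases j with
      | zero => simp [negList, nf_one, nf_zero]
      | succ j' =>
        rw [negList]
        rw [negList_cons j']
        simp
    rw [hshape, PySem.List.pyGetD_zero_cons, pyGetD_one_cons, nf_sub]
    rw [← hshape]
    rfl

-- B's fib loop computes fib[0..t+1]
theorem posLoopB (t : Nat) :
    (PySem.List.pyRange 0 (t : Int) 1).foldl
      (fun f _k => f ++ [PySem.List.pyGetD f (-1) 0 + PySem.List.pyGetD f (-2) 0])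
      [0, 1]
    = (List.range (t + 2)).map fi := by
  induction t with
  | zero =>
    simp [PySem.List.pyRange_one_eq_nil, List.range_succ, fi]
  | succ t ih =>
    have hsplit : PySem.List.pyRange 0 (↑(t + 1) : Int) 1
        = PySem.List.pyRange 0 (t : Int) 1 ++ [(t : Int)] := by
      have h3 : ((↑(t + 1) : Int)) = (t : Int) + 1 := by push_cast; ring
      rw [h3, PySem.List.pyRange_one_succ_right (by omega)]
    rw [hsplit, List.foldl_append, ih]
    simp only [List.foldl_cons, List.foldl_nil]
    have hlen : ((List.range (t + 2)).map fi).length = t + 2 := by simp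
    have h1 : PySem.List.pyGetD ((List.range (t + 2)).map fi) (-1) 0 = fi (t + 1) := by
      rw [PySem.List.pyGetD_neg_ofNat _ 1 0 (by omega) (by rw [hlen]; omega)]
      simp
    have h2 : PySem.List.pyGetD ((List.range (t + 2)).map fi) (-2) 0 = fi t := by
      rw [PySem.List.pyGetD_neg_ofNat _ 2 0 (by omega) (by rw [hlen]; omega)]
      simp
    rw [h1, h2]
    have hfi : fi (t + 1) + fi t = fi (t + 2) := by rw [fi_add_two]; ring
    rw [hfi]
    simp [List.range_succ]

-- B's negative comprehension equals negList (m-1) without its trailing 0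
theorem negCompB (m : Nat) (hm : 1 ≤ m) :
    (PySem.List.pyRange (m : Int) 0 (-1)).map
      (fun k => if PySem.Int.mod k 2 = 1 then PySem.List.pyGetD ((List.range (m + 1)).map fi) k 0
                else -(PySem.List.pyGetD ((List.range (m + 1)).map fi) k 0))
      ++ [0]
    = negList (m - 1) := by
  -- generalize: for 1 ≤ j ≤ m the countdown from j gives negList (j-1)
  suffices h : ∀ j : Nat, 1 ≤ j → j ≤ m →
      (PySem.List.pyRange (j : Int) 0 (-1)).map
        (fun k => if PySem.Int.mod k 2 = 1 then PySem.List.pyGetD ((List.range (m + 1)).map fi) k 0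
                  else -(PySem.List.pyGetD ((List.range (m + 1)).map fi) k 0))
        ++ [0]
      = negList (j - 1) by
    exact h m hm le_rfl
  intro j
  induction j with
  | zero => omega
  | succ j ih =>
    intro _ hjm
    have hcons : PySem.List.pyRange (↑(j + 1) : Int) 0 (-1)
        = (↑(j + 1) : Int) :: PySem.List.pyRange ((↑(j + 1) : Int) - 1) 0 (-1) := by
      exact PySem.List.pyRange_neg_one_cons (by push_cast; omega)
    rw [hcons]
    simp only [List.map_cons, List.cons_append]
    have hget : PySem.List.pyGetD ((List.range (m + 1)).map fi) (↑(j + 1) : Int) 0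
        = fi (j + 1) := by
      rw [PySem.List.pyGetD_natCast]
      rw [List.getD_eq_getElem _ _ (by simp; omega)]
      simp
    have hmod : PySem.Int.mod (↑(j + 1) : Int) 2 = ((j + 1) % 2 : Nat) := by
      rw [show PySem.Int.mod (↑(j + 1) : Int) 2 = (↑(j + 1) : Int) % 2 from rfl]
      push_cast [Int.emod_emod_of_dvd]
      omega
    have hhead : (if PySem.Int.mod (↑(j + 1) : Int) 2 = 1
          then PySem.List.pyGetD ((List.range (m + 1)).map fi) (↑(j + 1) : Int) 0
          else -(PySem.List.pyGetD ((List.range (m + 1)).map fi) (↑(j + 1) : Int) 0))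
        = nf (j + 1) := by
      rw [hget, hmod, nf]
      rcases Nat.even_or_odd (j + 1) with h | h
      · have h0 : (j + 1) % 2 = 0 := Nat.even_iff.mp h
        simp [h0]
      · have h1 : (j + 1) % 2 = 1 := Nat.odd_iff.mp h
        simp [h1]
    rw [hhead]
    cases j with
    | zero =>
      have hnil : PySem.List.pyRange ((1 : Int) - 1) 0 (-1) = [] :=
        PySem.List.pyRange_neg_one_eq_nil (by omega)
      simp only [Nat.zero_add, Nat.cast_one]
      rw [hnil]
      simp [negList, nf_one]
    | succ j' =>
      have hc : ((↑(j' + 1 + 1) : Int) - 1) = (↑(j' + 1) : Int) := by push_cast; ring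
      rw [hc, ih (by omega) (by omega)]
      simp [negList]

-- ===== VERDICT (by name: the statement is the Claim_ definition above) =====
theorem form_fibo_list_symmetrical_spec : Claim_equal_form_fibo_list_symmetrical := by
  intro number _
  unfold Spec_form_fibo_list_symmetrical
  rcases hN : number.natAbs with _ | t
  · have h0 : number = 0 := by omega
    subst h0
    decide
  · have habs : |number| = ((t : Int) + 1) := by
      rw [Int.abs_eq_natAbs, hN]; push_cast; ring
    simp only [form_fibo_list_symmetrical, form_fibo_list_symmetrical_alt, habs]
    have hmax : max ((t : Int) + 1) 1 = (t : Int) + 1 := by omega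
    rw [hmax]
    rw [posLoopA t]
    have hng := negLoopA (t + 1) t
    norm_num at hng ⊢
    have e1 : t + 1 + 1 = t + 2 := by ring
    rw [e1, show ((t : Int) + 2) = (t : Int) + 1 + 1 from by ring] at hng
    rw [hng, posLoopB t]
    have hcB := negCompB (t + 1) (by omega)
    rw [e1] at hcB
    push_cast at hcB
    norm_num at hcB
    rw [PySem.List.slice_to _ (show (0:Int) ≤ (t : Int) + 1 + 1 from by omega), show ((t : Int) + 1 + 1).toNat = t + 2 from by omega,
      List.take_of_length_le (by simp)]
    rw [← hcB, List.append_assoc]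
    congr 1
    rw [List.range_eq_range', show List.range' 0 (t + 2) = 0 :: List.range' 1 (t + 1) from rfl,
      List.map_cons, show fi 0 = 0 from rfl]
    rfl
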